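-- pv_equiv track=rewrite | github.com/karthiksai2000/HealthEase-AI | diet model/diet_predictor.py | normalize_activity_input
-- ===== SOURCE A (Python) =====
-- ACTIVITY_LEVELS = ["Sedentary", "Light", "Moderate", "Active"]
--
-- def normalize_activity_input(val):
--     if val is None:
--         return None
--     s = str(val).strip().lower()
--     for act in ACTIVITY_LEVELS:
--         if s == act.lower() or s == act.lower().replace("-", " "):
--             return act
--     if s.startswith("s"):
--         return "Sedentary"
--     if s.startswith("l"):
--         return "Light"
--     if s.startswith("m"):
--         return "Moderate"
--     if s.startswith("a"):
--         return "Active"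
--     return None
-- ===== SOURCE B (Python) =====
-- def normalize_activity_input(val):
--     if val is None:
--         return None
--     s = str(val).strip().lower()
--     if not s:
--         return None
--     return {'s': 'Sedentary', 'l': 'Light', 'm': 'Moderate', 'a': 'Active'}.get(s[0])
-- ===== Notes on version B (the rewrite author's own statement) =====
-- stated objective: simpler
-- what changed: The exact-match loop over ACTIVITY_LEVELS and the four startswith branches collapse into a single dict lookup on the first character of the normalized string (all four canonical names start with distinct letters, so the exact-match loop is subsumed by the prefix dispatch).
import Mathlib
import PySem

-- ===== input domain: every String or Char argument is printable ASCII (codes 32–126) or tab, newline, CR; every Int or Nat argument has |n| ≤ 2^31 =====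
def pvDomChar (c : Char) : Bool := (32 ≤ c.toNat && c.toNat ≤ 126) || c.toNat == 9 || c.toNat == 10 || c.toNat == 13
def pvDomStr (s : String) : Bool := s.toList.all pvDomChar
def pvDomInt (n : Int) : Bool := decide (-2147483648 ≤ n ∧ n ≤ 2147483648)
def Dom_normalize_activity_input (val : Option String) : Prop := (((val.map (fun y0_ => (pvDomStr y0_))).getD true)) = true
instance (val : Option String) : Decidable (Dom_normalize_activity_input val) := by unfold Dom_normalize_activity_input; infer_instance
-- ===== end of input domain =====

-- B replaces A's exact-match loop plus four startswith branches with a single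
-- dict lookup on the first character of the normalized string (objective: simpler).


-- ===== PORT A =====
def ACTIVITY_LEVELS : List String := ["Sedentary", "Light", "Moderate", "Active"]

-- the 'for act in ACTIVITY_LEVELS' loop with its early return
def naiLoop (s : String) : List String → Option String
  | [] => none
  | act :: rest =>
    if s == PySem.Str.lower act || s == PySem.Str.replace (PySem.Str.lower act) "-" " " then
      some act
    else naiLoop s rest

def normalize_activity_input (val : Option String) : Option String :=
  match val with
  | none => none
  | some v =>
    let s := PySem.Str.lower (PySem.Str.strip v)
    match naiLoop s ACTIVITY_LEVELS with
    | some act => some act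
    | none =>
      if PySem.Str.startswith s "s" then some "Sedentary"
      else if PySem.Str.startswith s "l" then some "Light"
      else if PySem.Str.startswith s "m" then some "Moderate"
      else if PySem.Str.startswith s "a" then some "Active"
      else none

-- ===== PORT B =====
def normalize_activity_input_alt (val : Option String) : Option String :=
  match val with
  | none => none
  | some v =>
    let s := PySem.Str.lower (PySem.Str.strip v)
    if s = "" then none
    else
      match PySem.Str.pyGet? s 0 with
      | none => none
      | some c =>
        (PySem.Dict.mk [('s', "Sedentary"), ('l', "Light"), ('m', "Moderate"), ('a', "Active")]).get? c

-- ===== PRECONDITION & SPEC =====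
def Spec_normalize_activity_input (val : Option String) (out : Option String) : Prop := out = normalize_activity_input_alt val
instance (val : Option String) (out : Option String) : Decidable (Spec_normalize_activity_input val out) := by unfold Spec_normalize_activity_input; infer_instance

-- ===== CLAIM (what is proved, stated in full; the proofs are below) =====
def Claim_equal_normalize_activity_input : Prop := ∀ (val : Option String), Dom_normalize_activity_input val → Spec_normalize_activity_input val (normalize_activity_input val)

-- ===== LEMMAS AND PROOFS =====

theorem beq_lit_false (s t : String) (c : Char) (cs : List Char)
    (h : s.toList = c :: cs) (hh : t.toList.head? ≠ some c) : (s == t) = false := by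
  rw [beq_eq_false_iff_ne]
  intro he; subst he
  rw [h] at hh
  exact hh rfl

theorem sw_true (c : Char) (cs : List Char) :
    PySem.Chars.startswith (c :: cs) [c] = true :=
  (PySem.Chars.startswith_iff _ _).mpr ⟨cs, rfl⟩

theorem sw_false (c d : Char) (cs : List Char) (hd : d ≠ c) :
    PySem.Chars.startswith (c :: cs) [d] = false := by
  rw [Bool.eq_false_iff]
  intro hsw
  rcases (PySem.Chars.startswith_iff _ _).mp hsw with ⟨u, hu⟩
  injection hu with h1 _
  exact hd h1

theorem pyget0 (s : String) (c : Char) (cs : List Char) (h : s.toList = c :: cs) :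
    PySem.Str.pyGet? s 0 = some c := by
  simp [PySem.List.pyGet?, PySem.List.pyIdx?, h]

theorem ne_empty (s : String) (c : Char) (cs : List Char) (h : s.toList = c :: cs) : ¬ s = "" := by
  intro he; subst he; simp at h

theorem nai_some (v : String) :
    normalize_activity_input (some v) = normalize_activity_input_alt (some v) := by
  simp only [normalize_activity_input, normalize_activity_input_alt]
  generalize PySem.Str.lower (PySem.Str.strip v) = s
  have e1 : PySem.Str.lower "Sedentary" = "sedentary" := by decide
  have e2 : PySem.Str.lower "Light" = "light" := by decide
  have e3 : PySem.Str.lower "Moderate" = "moderate" := by decide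
  have e4 : PySem.Str.lower "Active" = "active" := by decide
  have r1 : PySem.Str.replace "sedentary" "-" " " = "sedentary" := by decide
  have r2 : PySem.Str.replace "light" "-" " " = "light" := by decide
  have r3 : PySem.Str.replace "moderate" "-" " " = "moderate" := by decide
  have r4 : PySem.Str.replace "active" "-" " " = "active" := by decide
  rcases hl : s.toList with _ | ⟨c, cs⟩
  · have : s = "" := by
      cases he : s == "" with
      | true => exact eq_of_beq he
      | false =>
        exact absurd (String.toList_inj.mp (by rw [hl]; decide))
          (beq_eq_false_iff_ne.mp he)
    subst this
    decide
  · have hne := ne_empty s c cs hl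
    have hg := pyget0 s c cs hl
    simp only [naiLoop, ACTIVITY_LEVELS, e1, e2, e3, e4, r1, r2, r3, r4, Bool.or_self,
      if_neg hne, hg]
    by_cases h1 : c = 's'
    · subst h1
      have f2 := beq_lit_false s "light" 's' cs hl (by decide)
      have f3 := beq_lit_false s "moderate" 's' cs hl (by decide)
      have f4 := beq_lit_false s "active" 's' cs hl (by decide)
      cases hb : (s == "sedentary") <;>
        simp [hb, f2, f3, f4, hl, sw_true] <;> decide
    by_cases h2 : c = 'l'
    · subst h2
      have f1 := beq_lit_false s "sedentary" 'l' cs hl (by decide)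
      have f3 := beq_lit_false s "moderate" 'l' cs hl (by decide)
      have f4 := beq_lit_false s "active" 'l' cs hl (by decide)
      have sws := sw_false 'l' 's' cs (by decide)
      cases hb : (s == "light") <;>
        simp [hb, f1, f3, f4, hl, sw_true, sws] <;> decide
    by_cases h3 : c = 'm'
    · subst h3
      have f1 := beq_lit_false s "sedentary" 'm' cs hl (by decide)
      have f2 := beq_lit_false s "light" 'm' cs hl (by decide)
      have f4 := beq_lit_false s "active" 'm' cs hl (by decide)
      have sws := sw_false 'm' 's' cs (by decide)
      have swl := sw_false 'm' 'l' cs (by decide)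
      cases hb : (s == "moderate") <;>
        simp [hb, f1, f2, f4, hl, sw_true, sws, swl] <;> decide
    by_cases h4 : c = 'a'
    · subst h4
      have f1 := beq_lit_false s "sedentary" 'a' cs hl (by decide)
      have f2 := beq_lit_false s "light" 'a' cs hl (by decide)
      have f3 := beq_lit_false s "moderate" 'a' cs hl (by decide)
      have sws := sw_false 'a' 's' cs (by decide)
      have swl := sw_false 'a' 'l' cs (by decide)
      have swm := sw_false 'a' 'm' cs (by decide)
      cases hb : (s == "active") <;>
        simp [hb, f1, f2, f3, hl, sw_true, sws, swl, swm] <;> decide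
    · have f1 := beq_lit_false s "sedentary" c cs hl (by simpa using Ne.symm h1)
      have f2 := beq_lit_false s "light" c cs hl (by simpa using Ne.symm h2)
      have f3 := beq_lit_false s "moderate" c cs hl (by simpa using Ne.symm h3)
      have f4 := beq_lit_false s "active" c cs hl (by simpa using Ne.symm h4)
      have sws := sw_false c 's' cs (Ne.symm h1)
      have swl := sw_false c 'l' cs (Ne.symm h2)
      have swm := sw_false c 'm' cs (Ne.symm h3)
      have swa := sw_false c 'a' cs (Ne.symm h4)
      have g1 : ('s' == c) = false := by simpa using Ne.symm h1
      have g2 : ('l' == c) = false := by simpa using Ne.symm h2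
      have g3 : ('m' == c) = false := by simpa using Ne.symm h3
      have g4 : ('a' == c) = false := by simpa using Ne.symm h4
      simp [f1, f2, f3, f4, hl, sws, swl, swm, swa,
        PySem.Dict.get?, g1, g2, g3, g4]

-- ===== VERDICT (by name: the statement is the Claim_ definition above) =====
theorem normalize_activity_input_spec : Claim_equal_normalize_activity_input := by
  intro val _
  show normalize_activity_input val = normalize_activity_input_alt val
  cases val with
  | none => rfl
  | some v => exact nai_some v
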